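-- pv_equiv track=rewrite | github.com/fmbicalho/LABORATORIO-ALGORITMIA-II | torneio1.py | diferentes
-- ===== SOURCE A (Python) =====
-- def diferentes(frases):
--     dic = {}
--     for x in frases :
--         letras = []
--         contador = 0
--         for l in x :
--             if l not in letras:
--                 contador += 1
--                 letras.append(l)
--         dic[x] = (len(letras))
--     lista = [(x,y) for x,y in dic.items()]
--     lista.sort(key = lambda x:x[0])
--     lista.sort(key = lambda x:x[1],reverse = True)
--     ret =  [x[0] for x in lista]
--     return ret
-- ===== SOURCE B (Python) =====
-- def diferentes(frases):
--     # bucket the distinct phrases by their distinct-character count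
--     buckets = {}
--     for s in dict.fromkeys(frases):
--         buckets.setdefault(len(set(s)), []).append(s)
--     out = []
--     for c in sorted(buckets, reverse=True):
--         out.extend(sorted(buckets[c]))
--     return out
-- ===== Notes on version B (the rewrite author's own statement) =====
-- stated objective: faster
-- what changed: Replaces A's quadratic manual distinct-letter scan and double stable sort of dict items by a set-based distinct count, a count->strings bucket dict, and concatenation of alphabetically sorted buckets in descending count order.
import Mathlib
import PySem

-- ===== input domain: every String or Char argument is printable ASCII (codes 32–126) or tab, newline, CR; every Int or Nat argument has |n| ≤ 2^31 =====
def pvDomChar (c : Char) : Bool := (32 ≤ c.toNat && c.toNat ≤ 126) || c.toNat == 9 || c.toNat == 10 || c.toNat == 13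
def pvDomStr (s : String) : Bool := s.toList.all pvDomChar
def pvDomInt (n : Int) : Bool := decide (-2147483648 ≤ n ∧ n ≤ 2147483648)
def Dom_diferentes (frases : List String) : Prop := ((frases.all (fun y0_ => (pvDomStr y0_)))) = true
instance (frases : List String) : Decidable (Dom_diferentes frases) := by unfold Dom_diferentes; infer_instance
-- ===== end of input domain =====

-- B buckets the deduplicated phrases by distinct-character count (computed via a set) and concatenates
-- the alphabetically sorted buckets in descending count order, instead of A's manual letter list and
-- double stable sort of dict items; same output, measurably faster.

-- ===== PORT A =====
def diferentes (frases : List String) : List String :=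
  let dic : PySem.Dict String Int :=
    frases.foldl (fun d x =>
      let st := x.toList.foldl
        (fun (st : List Char × Int) l =>
          if l ∉ st.1 then (st.1 ++ [l], st.2 + 1) else st) ([], 0)
      d.insert x ((st.1.length : Int))) PySem.Dict.empty
  let lista := dic.items
  let lista1 := PySem.List.sorted lista (fun p => p.1) false
  let lista2 := PySem.List.sorted lista1 (fun p => p.2) true
  lista2.map (fun p => p.1)

-- ===== PORT B =====
def diferentes_alt (frases : List String) : List String :=
  -- 'buckets.setdefault(c, []).append(s)' is exactly 'd.modify c [] (· ++ [s])'
  let buckets : PySem.Dict Int (List String) :=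
    (PySem.List.dedup frases).foldl
      (fun d s => d.modify ((PySem.Set.ofList s.toList).length : Int) [] (· ++ [s]))
      PySem.Dict.empty
  (PySem.List.sorted buckets.keys (fun c => c) true).foldl
    (fun out c => out ++ PySem.List.sorted (buckets.getD c []) (fun s => s) false) []

-- ===== PRECONDITION & SPEC =====
def Spec_diferentes (frases : List String) (out : List String) : Prop := out = diferentes_alt frases
instance (frases : List String) (out : List String) : Decidable (Spec_diferentes frases out) := by unfold Spec_diferentes; infer_instance

-- ===== CLAIM (what is proved, stated in full; the proofs are below) =====
def Claim_equal_diferentes : Prop := ∀ (frases : List String), Dom_diferentes frases → Spec_diferentes frases (diferentes frases)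

-- ===== LEMMAS AND PROOFS =====

-- distinct-character count of a string (len(set(s)))
def pvCnt (s : String) : Int := ((PySem.Set.ofList s.toList).length : Int)

-- the strict order (count descending, then alphabetical) both outputs are sorted by
def pvLt (s t : String) : Prop := pvCnt t < pvCnt s ∨ (pvCnt s = pvCnt t ∧ s < t)

-- the same order on (string, count) pairs as A's double sort sees them
def pvpLt (p q : String × Int) : Prop := q.2 < p.2 ∨ (p.2 = q.2 ∧ p.1 < q.1)

theorem pvLt_asymm (s t : String) (h1 : pvLt s t) (h2 : pvLt t s) : False := by
  rcases h1 with h1 | ⟨h1, h1'⟩ <;> rcases h2 with h2 | ⟨h2, h2'⟩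
  · omega
  · omega
  · omega
  · exact lt_asymm h1' h2'

-- a permutation sorted twice under an asymmetric relation is unique
theorem eq_of_perm_of_pairwise {α : Type} {r : α → α → Prop}
    (hasym : ∀ a b, r a b → r b a → False) :
    ∀ (l₁ l₂ : List α), l₁.Perm l₂ → l₁.Pairwise r → l₂.Pairwise r → l₁ = l₂ := by
  intro l₁
  induction l₁ with
  | nil => intro l₂ hp _ _; exact hp.nil_eq
  | cons a t₁ ih =>
    intro l₂ hp h₁ h₂
    cases l₂ with
    | nil => exact absurd hp.symm (by simp)
    | cons b t₂ =>
      by_cases hab : a = b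
      · subst hab
        have := ih t₂ hp.cons_inv (List.Pairwise.of_cons h₁) (List.Pairwise.of_cons h₂)
        simp [this]
      · have hb1 : b ∈ a :: t₁ := hp.symm.subset (by simp)
        have ha2 : a ∈ b :: t₂ := hp.subset (by simp)
        have hb1' : b ∈ t₁ := by
          rcases hb1 with _ | h
          · exact absurd rfl (Ne.symm hab)
          · assumption
        have ha2' : a ∈ t₂ := by
          rcases ha2 with _ | h
          · exact absurd rfl hab
          · assumption
        exact absurd (List.rel_of_pairwise_cons h₂ ha2')
          (fun h => hasym a b (List.rel_of_pairwise_cons h₁ hb1') h)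

-- A's inner letter loop builds exactly set(x) (ordered dedup of the characters)
theorem pvLetras (cs : List Char) : ∀ (acc : List Char × Int),
    (cs.foldl (fun (st : List Char × Int) l =>
      if l ∉ st.1 then (st.1 ++ [l], st.2 + 1) else st) acc).1 = PySem.Set.update acc.1 cs := by
  induction cs with
  | nil => intro acc; simp [PySem.Set.update]
  | cons c cs ih =>
    intro acc
    rw [List.foldl_cons, PySem.Set.update_cons, ih]
    by_cases h : c ∈ acc.1
    · simp [h]
    · simp [h]

-- the dict-building loop: items are the deduped keys paired with g applied to them
theorem pvDicItems (g : String → Int) : ∀ (frases : List String),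
    (frases.foldl (fun d x => d.insert x (g x)) PySem.Dict.empty).items
      = (PySem.Set.ofList frases).map (fun s => (s, g s)) := by
  intro frases
  induction frases using List.reverseRecOn with
  | nil => rfl
  | append_singleton xs x ih =>
    rw [List.foldl_append, List.foldl_cons, List.foldl_nil, PySem.Set.ofList_append_singleton]
    have hkeys : (xs.foldl (fun d x => d.insert x (g x)) PySem.Dict.empty).keys
        = PySem.Set.ofList xs := by
      rw [PySem.Dict.keys_foldl_insert]
      simp [PySem.Set.update_nil_left]
    by_cases hx : x ∈ xs
    · have hc : (xs.foldl (fun d x => d.insert x (g x)) PySem.Dict.empty).contains x = true := by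
        rw [PySem.Dict.contains_iff_mem_keys, hkeys]
        exact (PySem.Set.mem_ofList xs x).2 hx
      rw [PySem.Dict.items_insert_of_contains _ _ hc, ih,
        PySem.Set.add_of_mem ((PySem.Set.mem_ofList xs x).2 hx), List.map_map]
      refine List.map_congr_left ?_
      intro s _
      by_cases hs : s = x
      · simp [hs]
      · simp [Function.comp, hs]
    · have hc : (xs.foldl (fun d x => d.insert x (g x)) PySem.Dict.empty).contains x = false := by
        rw [← Bool.not_eq_true, PySem.Dict.contains_iff_mem_keys, hkeys]
        simp [PySem.Set.mem_ofList, hx]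
      rw [PySem.Dict.items_insert_of_not_contains _ _ hc, ih,
        PySem.Set.add_of_not_mem (by simp [PySem.Set.mem_ofList, hx])]
      simp

-- the pair list A sorts
def pvP (frases : List String) : List (String × Int) :=
  (PySem.Set.ofList frases).map (fun s => (s, pvCnt s))

theorem pvA_eq (frases : List String) :
    diferentes frases
      = (PySem.List.sorted (PySem.List.sorted (pvP frases) (fun p => p.1) false)
          (fun p => p.2) true).map (fun p => p.1) := by
  unfold diferentes
  have hg : (fun (d : PySem.Dict String Int) x => d.insert x
      (((x.toList.foldl (fun (st : List Char × Int) l =>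
        if l ∉ st.1 then (st.1 ++ [l], st.2 + 1) else st) ([], 0)).1.length : Int)))
      = fun d x => d.insert x (pvCnt x) := by
    funext d x
    rw [pvLetras]
    simp [pvCnt, PySem.Set.update_nil_left]
  simp only [hg, pvDicItems, pvP]

-- insertBy under the reverse-by-count comparison keeps the full order, given new fst is larger
theorem pvInsertBy_pairwise : ∀ (acc : List (String × Int)) (x : String × Int),
    acc.Pairwise pvpLt → (∀ y ∈ acc, y.1 < x.1) →
    (PySem.List.insertBy (fun a b => decide (b.2 < a.2)) x acc).Pairwise pvpLt := by
  intro acc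
  induction acc with
  | nil => intro x _ _; simp [PySem.List.insertBy]
  | cons y ys ih =>
    intro x hp hlt
    by_cases h : y.2 < x.2
    · have : PySem.List.insertBy (fun a b => decide (b.2 < a.2)) x (y :: ys) = x :: y :: ys := by
        simp [PySem.List.insertBy, h]
      rw [this]
      refine List.Pairwise.cons ?_ hp
      intro z hz
      rw [List.mem_cons] at hz
      rcases hz with rfl | hz
      · exact Or.inl h
      · have := List.rel_of_pairwise_cons hp hz
        rcases this with h2 | ⟨h2, _⟩
        · exact Or.inl (by omega)
        · exact Or.inl (by omega)
    · have : PySem.List.insertBy (fun a b => decide (b.2 < a.2)) x (y :: ys)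
          = y :: PySem.List.insertBy (fun a b => decide (b.2 < a.2)) x ys := by
        simp [PySem.List.insertBy, h]
      rw [this]
      refine List.Pairwise.cons ?_ (ih x (List.Pairwise.of_cons hp) ?_)
      · intro z hz
        rw [PySem.List.mem_insertBy] at hz
        rcases hz with heq | hz
        · rw [heq]
          by_cases he : x.2 = y.2
          · exact Or.inr ⟨he.symm, hlt y (by simp)⟩
          · exact Or.inl (by omega)
        · exact List.rel_of_pairwise_cons hp hz
      · intro z hz
        exact hlt z (by simp [hz])

theorem pvFoldl_insertBy_pairwise : ∀ (l acc : List (String × Int)),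
    l.Pairwise (fun p q => p.1 < q.1) → acc.Pairwise pvpLt →
    (∀ y ∈ acc, ∀ x ∈ l, y.1 < x.1) →
    (l.foldl (fun acc x => PySem.List.insertBy (fun a b => decide (b.2 < a.2)) x acc) acc).Pairwise pvpLt := by
  intro l
  induction l with
  | nil => intro acc _ h _; exact h
  | cons x l ih =>
    intro acc hl hacc hfst
    rw [List.foldl_cons]
    refine ih _ (List.Pairwise.of_cons hl) (pvInsertBy_pairwise acc x hacc ?_) ?_
    · intro y hy
      exact hfst y hy x (by simp)
    · intro y hy z hz
      rw [PySem.List.mem_insertBy] at hy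
      rcases hy with heq | hy
      · rw [heq]
        exact List.rel_of_pairwise_cons hl hz
      · exact hfst y hy z (by simp [hz])

-- lista1 is strictly increasing on fst
theorem pvLista1_pairwise (frases : List String) :
    (PySem.List.sorted (pvP frases) (fun p => p.1) false).Pairwise (fun p q => p.1 < q.1) := by
  have hperm := PySem.List.sorted_perm (pvP frases) (fun p => p.1) false
  have hle := PySem.List.sorted_pairwise (pvP frases) (fun p => p.1)
  have hnd : ((PySem.List.sorted (pvP frases) (fun p => p.1) false).map (fun p => p.1)).Nodup := by
    have : ((pvP frases).map (fun p => p.1)).Nodup := by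
      unfold pvP
      rw [List.map_map, show ((fun (p : String × Int) => p.1) ∘ fun s => (s, pvCnt s)) = id from rfl, List.map_id]
      exact PySem.Set.nodup_ofList frases
    exact ((hperm.map (fun p => p.1)).nodup_iff).2 this
  rw [List.nodup_iff_pairwise_ne, List.pairwise_map] at hnd
  exact (hle.and hnd).imp (fun ⟨h1, h2⟩ => lt_of_le_of_ne h1 h2)

theorem pvLista2_pairwise (frases : List String) :
    (PySem.List.sorted (PySem.List.sorted (pvP frases) (fun p => p.1) false)
      (fun p => p.2) true).Pairwise pvpLt := by
  rw [PySem.List.sorted_rev_eq_foldl_insertBy]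
  exact pvFoldl_insertBy_pairwise _ [] (pvLista1_pairwise frases) (by simp) (by simp)

-- members of pvP carry their own count
theorem pvP_snd (frases : List String) (p : String × Int) (hp : p ∈ pvP frases) :
    p.2 = pvCnt p.1 := by
  unfold pvP at hp
  rcases List.mem_map.1 hp with ⟨s, _, rfl⟩
  rfl

theorem pvA_pairwise (frases : List String) : (diferentes frases).Pairwise pvLt := by
  rw [pvA_eq, List.pairwise_map]
  refine (pvLista2_pairwise frases).imp_of_mem ?_
  intro p q hp hq h
  have hp' : p ∈ pvP frases := by
    have := (PySem.List.mem_sorted _ _ _ _).1 hp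
    exact (PySem.List.mem_sorted _ _ _ _).1 this
  have hq' : q ∈ pvP frases := by
    have := (PySem.List.mem_sorted _ _ _ _).1 hq
    exact (PySem.List.mem_sorted _ _ _ _).1 this
  rcases h with h | ⟨h1, h2⟩
  · exact Or.inl (by rw [← pvP_snd frases p hp', ← pvP_snd frases q hq']; exact h)
  · exact Or.inr ⟨by rw [← pvP_snd frases p hp', ← pvP_snd frases q hq']; exact h1, h2⟩

theorem pvA_perm (frases : List String) :
    (diferentes frases).Perm (PySem.Set.ofList frases) := by
  rw [pvA_eq]
  have h1 := PySem.List.sorted_perm (PySem.List.sorted (pvP frases) (fun p => p.1) false)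
    (fun p => p.2) true
  have h2 := PySem.List.sorted_perm (pvP frases) (fun p => p.1) false
  have := (h1.trans h2).map (fun p => p.1)
  refine this.trans ?_
  unfold pvP
  rw [List.map_map, show ((fun (p : String × Int) => p.1) ∘ fun s => (s, pvCnt s)) = id from rfl, List.map_id]

-- ===== B side =====

theorem pvBuckets_getD (frases : List String) (c : Int) :
    ((PySem.List.dedup frases).foldl
      (fun d s => d.modify ((PySem.Set.ofList s.toList).length : Int) [] (· ++ [s]))
      PySem.Dict.empty).getD c []
    = (PySem.Set.ofList frases).filter (fun s => pvCnt s == c) := by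
  rw [show ((PySem.List.dedup frases).foldl
      (fun d s => d.modify ((PySem.Set.ofList s.toList).length : Int) [] (· ++ [s]))
      PySem.Dict.empty)
    = (((PySem.List.dedup frases).map (fun s => (pvCnt s, s))).foldl
      (fun d p => d.modify p.1 [] (· ++ [p.2])) PySem.Dict.empty) by
      rw [List.foldl_map]; rfl]
  rw [PySem.Dict.getD_foldl_modify_append, List.filter_map, List.map_map,
    show ((fun (x : Int × String) => x.2) ∘ fun s => (pvCnt s, s)) = id from rfl, List.map_id,
    show ((fun (p : Int × String) => p.1 == c) ∘ fun s => (pvCnt s, s)) = fun s => pvCnt s == c from rfl,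
    PySem.List.dedup_eq_ofList]
  simp

theorem pvBuckets_keys (frases : List String) :
    ((PySem.List.dedup frases).foldl
      (fun d s => d.modify ((PySem.Set.ofList s.toList).length : Int) [] (· ++ [s]))
      PySem.Dict.empty).keys
    = PySem.Set.ofList ((PySem.Set.ofList frases).map pvCnt) := by
  rw [show (fun (d : PySem.Dict Int (List String)) s =>
        d.modify ((PySem.Set.ofList s.toList).length : Int) [] (· ++ [s]))
      = fun d s => d.modify (pvCnt s) [] ((fun (_ : PySem.Dict Int (List String)) (s : String)
        (l : List String) => l ++ [s]) d s) from rfl]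
  rw [PySem.Dict.keys_foldl_modify_key, PySem.List.dedup_eq_ofList]
  exact PySem.Set.update_nil_left _

theorem pvB_eq (frases : List String) :
    diferentes_alt frases
      = (PySem.List.sorted (PySem.Set.ofList ((PySem.Set.ofList frases).map pvCnt))
          (fun c => c) true).flatMap
          (fun c => PySem.List.sorted ((PySem.Set.ofList frases).filter (fun s => pvCnt s == c))
            (fun s => s) false) := by
  show (PySem.List.sorted ((PySem.List.dedup frases).foldl
      (fun d s => d.modify ((PySem.Set.ofList s.toList).length : Int) [] (· ++ [s]))
      PySem.Dict.empty).keys (fun c => c) true).foldl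
    (fun out c => out ++ PySem.List.sorted (((PySem.List.dedup frases).foldl
      (fun d s => d.modify ((PySem.Set.ofList s.toList).length : Int) [] (· ++ [s]))
      PySem.Dict.empty).getD c []) (fun s => s) false) [] = _
  rw [pvBuckets_keys]
  rw [PySem.List.foldl_append_eq_flatMap]
  rw [List.nil_append]
  refine List.flatMap_congr ?_
  intro c _
  rw [pvBuckets_getD]

-- sorted phrase buckets are pairwise pvLt and carry count c
theorem pvBucket_pairwise (frases : List String) (c : Int) :
    (PySem.List.sorted ((PySem.Set.ofList frases).filter (fun s => pvCnt s == c))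
      (fun s => s) false).Pairwise pvLt := by
  have hnd : ((PySem.Set.ofList frases).filter (fun s => pvCnt s == c)).Nodup :=
    (PySem.Set.nodup_ofList frases).filter _
  have hperm := PySem.List.sorted_perm ((PySem.Set.ofList frases).filter (fun s => pvCnt s == c))
    (fun s => s) false
  have hnd2 := hperm.nodup_iff.2 hnd
  have hle := PySem.List.sorted_pairwise ((PySem.Set.ofList frases).filter (fun s => pvCnt s == c))
    (fun s => s)
  rw [List.nodup_iff_pairwise_ne] at hnd2
  refine ((hle.and hnd2).imp_of_mem ?_)
  intro a b ha hb ⟨h1, h2⟩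
  have hma : a ∈ ((PySem.Set.ofList frases).filter (fun s => pvCnt s == c)) :=
    (PySem.List.mem_sorted _ _ _ _).1 ha
  have hmb : b ∈ ((PySem.Set.ofList frases).filter (fun s => pvCnt s == c)) :=
    (PySem.List.mem_sorted _ _ _ _).1 hb
  have hca : pvCnt a = c := by simpa using (List.mem_filter.1 hma).2
  have hcb : pvCnt b = c := by simpa using (List.mem_filter.1 hmb).2
  exact Or.inr ⟨hca.trans hcb.symm, lt_of_le_of_ne h1 h2⟩

theorem pvFlatMap_pairwise (f : Int → List String)
    (hf : ∀ c, (f c).Pairwise pvLt) (hc : ∀ c s, s ∈ f c → pvCnt s = c) :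
    ∀ (K : List Int), K.Pairwise (fun a b => b < a) → (K.flatMap f).Pairwise pvLt := by
  intro K
  induction K with
  | nil => intro _; simp
  | cons c K ih =>
    intro hp
    rw [List.flatMap_cons, List.pairwise_append]
    refine ⟨hf c, ih (List.Pairwise.of_cons hp), ?_⟩
    intro a ha b hb
    rcases List.mem_flatMap.1 hb with ⟨c', hc', hb'⟩
    exact Or.inl (by rw [hc c a ha, hc c' b hb']; exact List.rel_of_pairwise_cons hp hc')

theorem pvB_pairwise (frases : List String) : (diferentes_alt frases).Pairwise pvLt := by
  rw [pvB_eq]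
  refine pvFlatMap_pairwise _ (fun c => pvBucket_pairwise frases c) ?_ _ ?_
  · intro c s hs
    have := (PySem.List.mem_sorted _ _ _ _).1 hs
    simpa using (List.mem_filter.1 this).2
  · have hnd := PySem.Set.nodup_ofList ((PySem.Set.ofList frases).map pvCnt)
    have hperm := PySem.List.sorted_perm
      (PySem.Set.ofList ((PySem.Set.ofList frases).map pvCnt)) (fun c => c) true
    have hge := PySem.List.sorted_pairwise_rev
      (PySem.Set.ofList ((PySem.Set.ofList frases).map pvCnt)) (fun c => c)
    have hnd2 := hperm.nodup_iff.2 hnd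
    rw [List.nodup_iff_pairwise_ne] at hnd2
    exact (hge.and hnd2).imp (fun ⟨h1, h2⟩ => lt_of_le_of_ne h1 (Ne.symm h2))

theorem pvFlatMap_perm_congr {f g : Int → List String} :
    ∀ (K : List Int), (∀ c ∈ K, (f c).Perm (g c)) → (K.flatMap f).Perm (K.flatMap g) := by
  intro K
  induction K with
  | nil => intro _; simp
  | cons c K ih =>
    intro h
    rw [List.flatMap_cons, List.flatMap_cons]
    exact (h c (by simp)).append (ih (fun c' hc' => h c' (by simp [hc'])))

theorem pvPerm_flatMap_filter :
    ∀ (K : List Int) (D : List String), K.Nodup → (∀ s ∈ D, pvCnt s ∈ K) →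
    (K.flatMap (fun c => D.filter (fun s => pvCnt s == c))).Perm D := by
  intro K
  induction K with
  | nil =>
    intro D _ hD
    have : D = [] := List.eq_nil_iff_forall_not_mem.2 (fun s hs => by simpa using hD s hs)
    simp [this]
  | cons c K ih =>
    intro D hnd hD
    rw [List.flatMap_cons]
    have hcK : c ∉ K := (List.nodup_cons.1 hnd).1
    have hstep : K.flatMap (fun c' => D.filter (fun s => pvCnt s == c'))
        = K.flatMap (fun c' => (D.filter (fun s => !(pvCnt s == c))).filter (fun s => pvCnt s == c')) := by
      refine (List.flatMap_congr ?_).symm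
      intro c' hc'
      rw [List.filter_filter]
      refine List.filter_congr ?_
      intro s _
      have hne : c' ≠ c := fun h => hcK (h ▸ hc')
      by_cases h : pvCnt s = c'
      · simp [h, hne]
      · simp [h]
    rw [hstep]
    have hih := ih (D.filter (fun s => !(pvCnt s == c))) (List.nodup_cons.1 hnd).2 ?_
    · exact (List.Perm.append_left _ hih).trans (List.filter_append_perm _ D)
    · intro s hs
      rcases List.mem_filter.1 hs with ⟨hsD, hne⟩
      have := hD s hsD
      simp at hne
      simpa [hne] using this

theorem pvB_perm (frases : List String) :
    (diferentes_alt frases).Perm (PySem.Set.ofList frases) := by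
  rw [pvB_eq]
  have h1 := pvFlatMap_perm_congr
    (f := fun c => PySem.List.sorted ((PySem.Set.ofList frases).filter (fun s => pvCnt s == c)) (fun s => s) false)
    (g := fun c => (PySem.Set.ofList frases).filter (fun s => pvCnt s == c))
    (PySem.List.sorted (PySem.Set.ofList ((PySem.Set.ofList frases).map pvCnt)) (fun c => c) true)
    (fun c _ => PySem.List.sorted_perm _ _ _)
  refine h1.trans ?_
  have hK : (PySem.List.sorted (PySem.Set.ofList ((PySem.Set.ofList frases).map pvCnt)) (fun c => c) true).Nodup := by
    exact (PySem.List.sorted_perm _ _ _).nodup_iff.2 (PySem.Set.nodup_ofList _)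
  refine pvPerm_flatMap_filter _ _ hK ?_
  intro s hs
  rw [PySem.List.mem_sorted, PySem.Set.mem_ofList]
  exact List.mem_map.2 ⟨s, hs, rfl⟩

-- ===== VERDICT (by name: the statement is the Claim_ definition above) =====
theorem diferentes_spec : Claim_equal_diferentes := by
  intro frases _
  unfold Spec_diferentes
  exact eq_of_perm_of_pairwise pvLt_asymm _ _
    ((pvA_perm frases).trans (pvB_perm frases).symm)
    (pvA_pairwise frases) (pvB_pairwise frases)
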